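-- pv_equiv track=rewrite | github.com/searobbersduck/DFSolution | alzheimer/utils.py | kappa_confusion_matrix
-- ===== SOURCE A (Python) =====
-- def kappa_confusion_matrix(rater_a, rater_b, min_rating=None, max_rating=None):
-- 	"""
-- 	Returns the confusion matrix between rater's ratings
-- 	"""
-- 	assert (len(rater_a) == len(rater_b))
-- 	if min_rating is None:
-- 		min_rating = min(rater_a + rater_b)
-- 	if max_rating is None:
-- 		max_rating = max(rater_a + rater_b)
-- 	num_ratings = int(max_rating - min_rating + 1)
-- 	conf_mat = [[0 for i in range(num_ratings)]
-- 	            for j in range(num_ratings)]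
-- 	for a, b in zip(rater_a, rater_b):
-- 		conf_mat[a - min_rating][b - min_rating] += 1
-- 	return conf_mat
-- ===== SOURCE B (Python) =====
-- def kappa_confusion_matrix(rater_a, rater_b, min_rating=None, max_rating=None):
--     """
--     Returns the confusion matrix between rater's ratings
--     """
--     assert (len(rater_a) == len(rater_b))
--     if min_rating is None:
--         min_rating = min(rater_a + rater_b)
--     if max_rating is None:
--         max_rating = max(rater_a + rater_b)
--     num_ratings = int(max_rating - min_rating + 1)
--     pairs = list(zip(rater_a, rater_b))
--     for pair in pairs:
--         if not (min_rating <= pair[0] <= max_rating and min_rating <= pair[1] <= max_rating):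
--             raise ValueError("rating outside [min_rating, max_rating]: %r" % (pair,))
--     return [[pairs.count((i + min_rating, j + min_rating))
--              for j in range(num_ratings)]
--             for i in range(num_ratings)]
-- ===== Notes on version B (the rewrite author's own statement) =====
-- stated objective: alternative
-- what changed: B computes each cell of the R x R grid directly as pairs.count((i+min, j+min)) -- a per-cell scan of the pair list -- instead of A's single scatter pass of in-place increments into a pre-zeroed grid; it trades O(n + R^2) for O(n * R^2), and rejects ratings outside [min_rating, max_rating] with a ValueError where A raises IndexError or silently wraps a negative index.
-- outside the precondition, e.g. on kappa_confusion_matrix([0], [0], 1, 1): A returns [[1]], B raises ValueError; on kappa_confusion_matrix([0, 1], [1, 1], 1, 2): A returns [[1, 0], [1, 0]], B raises ValueError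
import Mathlib
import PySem

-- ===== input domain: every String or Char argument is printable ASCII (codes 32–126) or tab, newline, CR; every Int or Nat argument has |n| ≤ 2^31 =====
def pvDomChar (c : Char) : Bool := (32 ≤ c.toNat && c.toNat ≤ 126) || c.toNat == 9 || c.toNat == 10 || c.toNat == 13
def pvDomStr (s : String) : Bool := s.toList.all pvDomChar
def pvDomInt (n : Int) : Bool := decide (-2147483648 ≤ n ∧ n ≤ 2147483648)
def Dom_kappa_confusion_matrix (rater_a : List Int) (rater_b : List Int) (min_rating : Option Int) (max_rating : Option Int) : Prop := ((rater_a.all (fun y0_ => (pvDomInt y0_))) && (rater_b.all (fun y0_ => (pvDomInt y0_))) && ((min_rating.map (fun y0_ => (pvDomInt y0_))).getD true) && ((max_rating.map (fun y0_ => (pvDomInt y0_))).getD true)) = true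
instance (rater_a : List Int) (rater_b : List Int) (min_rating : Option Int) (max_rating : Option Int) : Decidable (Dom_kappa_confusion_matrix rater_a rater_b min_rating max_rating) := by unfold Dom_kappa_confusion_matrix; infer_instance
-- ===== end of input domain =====

-- B fills each grid cell directly by counting its (a, b) pair in the pair list instead of
-- A's single scatter pass of in-place increments ("alternative", O(n·R²) vs O(n+R²));
-- B raises ValueError on ratings outside [min_rating, max_rating], where A raises
-- IndexError or wraps a negative index.

-- ===== PORT A =====
-- Python 'conf_mat[i][j] += 1' with possibly negative (wrapping) indices; out of range = IndexError (excluded by Pre_).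
def pyIncr2 (m : List (List Int)) (i j : Int) : List (List Int) :=
  let n : Int := m.length
  let i' := if i < 0 then i + n else i
  if 0 ≤ i' ∧ i' < n then
    m.modify i'.toNat (fun row =>
      let rn : Int := row.length
      let j' := if j < 0 then j + rn else j
      if 0 ≤ j' ∧ j' < rn then row.modify j'.toNat (· + 1) else row)
  else m

def kappa_confusion_matrix (rater_a : List Int) (rater_b : List Int) (min_rating : Option Int) (max_rating : Option Int) : List (List Int) :=
  let mn := min_rating.getD ((PySem.List.min? (rater_a ++ rater_b) (fun x => x)).getD 0)
  let mx := max_rating.getD ((PySem.List.max? (rater_a ++ rater_b) (fun x => x)).getD 0)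
  let num := mx - mn + 1
  let conf := (PySem.List.pyRange 0 num 1).map (fun _ => (PySem.List.pyRange 0 num 1).map (fun _ => (0 : Int)))
  (rater_a.zip rater_b).foldl (fun m p => pyIncr2 m (p.1 - mn) (p.2 - mn)) conf

-- ===== PORT B =====
def kappa_confusion_matrix_alt (rater_a : List Int) (rater_b : List Int) (min_rating : Option Int) (max_rating : Option Int) : List (List Int) :=
  let mn := min_rating.getD ((PySem.List.min? (rater_a ++ rater_b) (fun x => x)).getD 0)
  let mx := max_rating.getD ((PySem.List.max? (rater_a ++ rater_b) (fun x => x)).getD 0)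
  let num := mx - mn + 1
  let pairs := rater_a.zip rater_b
  -- Source B's validation loop raises ValueError on an out-of-range pair; that is
  -- unreachable inside Pre_, which excludes such inputs, so the port carries no branch for it.
  (PySem.List.pyRange 0 num 1).map (fun i =>
    (PySem.List.pyRange 0 num 1).map (fun j => (PySem.List.count pairs (i + mn, j + mn) : Int)))

-- ===== PRECONDITION & SPEC =====
-- Pre_ excludes the inputs where A raises (unequal lengths: AssertionError; empty
-- lists with a missing bound: ValueError from min/max) and the inputs with a rating
-- outside the effective [min_rating, max_rating], where A raises IndexError or — for
-- slightly-low ratings — silently wraps the negative index into the far end of the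
-- matrix, and where B raises ValueError.
def Pre_kappa_confusion_matrix (rater_a : List Int) (rater_b : List Int) (min_rating : Option Int) (max_rating : Option Int) : Prop :=
  rater_a.length = rater_b.length ∧
  ((min_rating = none ∨ max_rating = none) → rater_a ++ rater_b ≠ []) ∧
  (∀ x ∈ rater_a ++ rater_b,
     min_rating.getD ((PySem.List.min? (rater_a ++ rater_b) (fun y => y)).getD 0) ≤ x ∧
     x ≤ max_rating.getD ((PySem.List.max? (rater_a ++ rater_b) (fun y => y)).getD 0))
instance (rater_a : List Int) (rater_b : List Int) (min_rating : Option Int) (max_rating : Option Int) : Decidable (Pre_kappa_confusion_matrix rater_a rater_b min_rating max_rating) := by unfold Pre_kappa_confusion_matrix; infer_instance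

def pvWitness_kappa_confusion_matrix : List Int × List Int × Option Int × Option Int := ([0, 1], [1, 0], none, none)

def Spec_kappa_confusion_matrix (rater_a : List Int) (rater_b : List Int) (min_rating : Option Int) (max_rating : Option Int) (out : List (List Int)) : Prop := out = kappa_confusion_matrix_alt rater_a rater_b min_rating max_rating
instance (rater_a : List Int) (rater_b : List Int) (min_rating : Option Int) (max_rating : Option Int) (out : List (List Int)) : Decidable (Spec_kappa_confusion_matrix rater_a rater_b min_rating max_rating out) := by unfold Spec_kappa_confusion_matrix; infer_instance

-- ===== CLAIM (what is proved, stated in full; the proofs are below) =====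
def Claim_equal_kappa_confusion_matrix : Prop := ∀ (rater_a : List Int) (rater_b : List Int) (min_rating : Option Int) (max_rating : Option Int), Dom_kappa_confusion_matrix rater_a rater_b min_rating max_rating → Pre_kappa_confusion_matrix rater_a rater_b min_rating max_rating → Spec_kappa_confusion_matrix rater_a rater_b min_rating max_rating (kappa_confusion_matrix rater_a rater_b min_rating max_rating)

-- ===== LEMMAS AND PROOFS =====
theorem pv_grid_incr (num ia jb : Int) (c : Int → Int → Int)
    (h0 : 0 ≤ ia) (h1 : ia < num) (h2 : 0 ≤ jb) (h3 : jb < num) :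
    pyIncr2 ((PySem.List.pyRange 0 num 1).map (fun i => (PySem.List.pyRange 0 num 1).map (fun j => c i j))) ia jb
    = (PySem.List.pyRange 0 num 1).map (fun i => (PySem.List.pyRange 0 num 1).map (fun j => if i = ia ∧ j = jb then c i j + 1 else c i j)) := by
  have hnum : 0 < num := by omega
  have hlen : ∀ (f : Int → List Int), (((PySem.List.pyRange 0 num 1).map f).length : Int) = num := by
    intro f; simp [PySem.List.length_pyRange_one]; omega
  simp only [pyIncr2, hlen]
  rw [if_neg (show ¬ ia < 0 by omega), if_pos (show 0 ≤ ia ∧ ia < num from ⟨h0, h1⟩)]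
  apply List.ext_getElem
  · simp
  · intro k hk hk'
    simp only [List.length_modify, List.length_map, PySem.List.length_pyRange_one] at hk
    rw [List.getElem_modify]
    by_cases hkia : ia.toNat = k
    · rw [if_pos hkia]
      simp only [List.getElem_map, PySem.List.getElem_pyRange_one]
      rw [if_neg (show ¬ jb < 0 by omega)]
      split_ifs with hcond
      case neg => exact absurd ⟨h2, by simp [PySem.List.length_pyRange_one]; omega⟩ hcond
      apply List.ext_getElem
      · simp
      · intro l hl hl'
        simp only [List.length_modify, List.length_map, PySem.List.length_pyRange_one] at hl
        rw [List.getElem_modify]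
        have hke : (0:Int) + (k:Int) = ia := by omega
        by_cases hljb : jb.toNat = l
        · rw [if_pos hljb]
          simp only [List.getElem_map, PySem.List.getElem_pyRange_one]
          rw [if_pos (show (0:Int) + ↑k = ia ∧ (0:Int) + ↑l = jb from ⟨hke, by omega⟩)]
        · rw [if_neg hljb]
          simp only [List.getElem_map, PySem.List.getElem_pyRange_one]
          rw [if_neg (show ¬((0:Int) + ↑k = ia ∧ (0:Int) + ↑l = jb) by omega)]
    · rw [if_neg hkia]
      simp only [List.getElem_map, PySem.List.getElem_pyRange_one]
      apply List.map_congr_left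
      intro a _
      rw [if_neg (show ¬((0:Int) + ↑k = ia ∧ a = jb) by omega)]

theorem pv_foldl_incr (mn num : Int) (ps : List (Int × Int)) (c : Int → Int → Int) :
    (∀ p ∈ ps, mn ≤ p.1 ∧ p.1 - mn < num ∧ mn ≤ p.2 ∧ p.2 - mn < num) →
    ps.foldl (fun m p => pyIncr2 m (p.1 - mn) (p.2 - mn))
      ((PySem.List.pyRange 0 num 1).map (fun i => (PySem.List.pyRange 0 num 1).map (fun j => c i j)))
    = (PySem.List.pyRange 0 num 1).map (fun i => (PySem.List.pyRange 0 num 1).map (fun j => c i j + (ps.count (i + mn, j + mn) : Int))) := by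
  induction ps generalizing c with
  | nil => intro _; simp
  | cons p t ih =>
    intro hps
    obtain ⟨ha1, ha2, hb1, hb2⟩ := hps p (List.mem_cons_self ..)
    simp only [List.foldl_cons]
    rw [pv_grid_incr num (p.1 - mn) (p.2 - mn) c (by omega) (by omega) (by omega) (by omega)]
    rw [ih (fun i j => if i = p.1 - mn ∧ j = p.2 - mn then c i j + 1 else c i j)
        (fun q hq => hps q (List.mem_cons_of_mem _ hq))]
    apply List.map_congr_left; intro i _
    apply List.map_congr_left; intro j _
    rw [List.count_cons]
    by_cases h : i = p.1 - mn ∧ j = p.2 - mn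
    · rw [if_pos h]
      rw [if_pos (show ((p == ((i + mn, j + mn) : Int × Int)) = true) by
        rw [beq_iff_eq]; obtain ⟨h1, h2⟩ := h; obtain ⟨pa, pb⟩ := p
        simp only [Prod.mk.injEq]; constructor <;> [skip; skip] <;> omega)]
      push_cast; ring
    · rw [if_neg h]
      rw [if_neg (show ¬ ((p == ((i + mn, j + mn) : Int × Int)) = true) by
        rw [beq_iff_eq]; intro he; apply h
        obtain ⟨pa, pb⟩ := p; simp only [Prod.mk.injEq] at he
        constructor <;> omega)]
      simp

theorem pv_grid_main (ra rb : List Int) (mr Mr : Option Int)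
    (hbound : ∀ x ∈ ra ++ rb,
       mr.getD ((PySem.List.min? (ra ++ rb) (fun y => y)).getD 0) ≤ x ∧
       x ≤ Mr.getD ((PySem.List.max? (ra ++ rb) (fun y => y)).getD 0)) :
    kappa_confusion_matrix ra rb mr Mr = kappa_confusion_matrix_alt ra rb mr Mr := by
  simp only [kappa_confusion_matrix, kappa_confusion_matrix_alt]
  set mn := mr.getD ((PySem.List.min? (ra ++ rb) (fun x => x)).getD 0) with hmn
  set mx := Mr.getD ((PySem.List.max? (ra ++ rb) (fun x => x)).getD 0) with hmx
  have hkey : ∀ p ∈ ra.zip rb,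
      mn ≤ p.1 ∧ p.1 - mn < (mx - mn + 1) ∧ mn ≤ p.2 ∧ p.2 - mn < (mx - mn + 1) := by
    intro p hp
    obtain ⟨hpa, hpb⟩ := List.of_mem_zip hp
    obtain ⟨h1, h2⟩ := hbound p.1 (List.mem_append_left _ hpa)
    obtain ⟨h3, h4⟩ := hbound p.2 (List.mem_append_right _ hpb)
    exact ⟨h1, by omega, h3, by omega⟩
  rw [show ((PySem.List.pyRange 0 (mx - mn + 1) 1).map
        (fun _ => (PySem.List.pyRange 0 (mx - mn + 1) 1).map (fun _ => (0 : Int))))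
      = ((PySem.List.pyRange 0 (mx - mn + 1) 1).map
        (fun i => (PySem.List.pyRange 0 (mx - mn + 1) 1).map (fun j => (fun _ _ => (0:Int)) i j))) from rfl]
  rw [pv_foldl_incr mn (mx - mn + 1) (ra.zip rb) (fun _ _ => (0:Int)) hkey]
  simp [PySem.List.count_eq]

-- ===== VERDICT (by name: the statement is the Claim_ definition above) =====
theorem kappa_confusion_matrix_spec : Claim_equal_kappa_confusion_matrix := by
  intro ra rb mr Mr _ hpre
  exact pv_grid_main ra rb mr Mr hpre.2.2
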